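-- pv_equiv track=rewrite | github.com/franciszver/GChallenges | Challenges/fuelInjection.py | solution
-- ===== SOURCE A (Python) =====
-- def solution(n):
--     n = int(n)
--     previous = 1
--     total = 1
--     steps = 0
--     forwards = 0
--     backwards = 0
--     if n <= 2:
--         return steps
--     for i in range(n):
--         if total == n:
--             return steps
--         if total > n:
--             #check subtract
--             backwards = 0
--             for j in range(total*2):
--                 if total-j > n:
--                     backwards = backwards + 1
--                 else:
--                     break
--             #check add
--             forwards = 0
--             for k in range(total*2):
--                 if previous+k < n:
--                     forwards = forwards + 1
--                 else:
--                     break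
--             if forwards == backwards:
--                 steps = steps + forwards-1
--             if forwards < backwards:
--                 steps = steps + forwards-1
--             if forwards > backwards:
--                 steps = steps + backwards
--             return steps
--         previous = total
--         total = total * 2
--         steps = steps + 1
--     return steps
-- ===== SOURCE B (Python) =====
-- def solution(n):
--     n = int(n)
--     if n <= 2:
--         return 0
--     # double to the first power of two >= n
--     k, t = 0, 1
--     while t < n:
--         t *= 2
--         k += 1
--     if t == n:
--         return k
--     forwards = n - t // 2
--     backwards = t - n
--     return k + (forwards - 1 if forwards <= backwards else backwards)
-- ===== Notes on version B (the rewrite author's own statement) =====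
-- stated objective: faster
-- what changed: Replaces the O(n)-bounded outer loop and the two inner counting scans of length up to 2*total by a doubling while-loop plus closed-form forwards = n - total//2 and backwards = total - n.
import Mathlib
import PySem

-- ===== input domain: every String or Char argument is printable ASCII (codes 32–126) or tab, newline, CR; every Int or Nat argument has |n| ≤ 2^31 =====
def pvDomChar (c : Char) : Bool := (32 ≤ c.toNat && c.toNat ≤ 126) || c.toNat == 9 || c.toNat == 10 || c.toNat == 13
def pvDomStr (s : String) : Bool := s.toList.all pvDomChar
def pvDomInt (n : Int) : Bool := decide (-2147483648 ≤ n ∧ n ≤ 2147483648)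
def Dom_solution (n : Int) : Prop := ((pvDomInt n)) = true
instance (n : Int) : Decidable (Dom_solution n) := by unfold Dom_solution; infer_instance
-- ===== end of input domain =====

-- B replaces A's O(n)-bounded outer loop and inner counting scans by a doubling loop
-- with closed-form forwards/backwards (objective: faster, measured asymptotically).


-- ===== PORT A =====
-- 'for j in range(m): if cond(j): cnt += 1 else: break' : counting loop with break,
-- iterated by index j (range(m) is not materialized; same iteration sequence)
def countWhileA (m j acc : Int) (p : Int → Bool) : Int :=
  if h : j < m then (if p j then countWhileA m (j + 1) (acc + 1) p else acc) else acc
termination_by (m - j).toNat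
decreasing_by omega

-- the body of 'for i in range(n)' (i unused: n iterations of fuel) with its early
-- returns, state (previous, total, steps)
def loopA (n : Int) (fuel : Nat) (previous total steps : Int) : Int :=
  match fuel with
  | 0 => steps
  | fuel' + 1 =>
    if total = n then steps
    else if total > n then
      let backwards := countWhileA (total * 2) 0 0 (fun j => decide (total - j > n))
      let forwards := countWhileA (total * 2) 0 0 (fun k => decide (previous + k < n))
      let steps := if forwards = backwards then steps + forwards - 1 else steps
      let steps := if forwards < backwards then steps + forwards - 1 else steps
      let steps := if forwards > backwards then steps + backwards else steps
      steps
    else loopA n fuel' total (total * 2) (steps + 1)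

def solution (n : Int) : Int :=
  if n ≤ 2 then 0
  else loopA n n.toNat 1 1 0

-- ===== PORT B =====
-- 'while t < n: t *= 2; k += 1' (the 0 < t guard only ensures termination; B calls it with t = 1)
def loopB (n k t : Int) : Int × Int :=
  if h : t < n ∧ 0 < t then loopB n (k + 1) (t * 2) else (k, t)
termination_by (n - t).toNat
decreasing_by omega

def solution_alt (n : Int) : Int :=
  if n ≤ 2 then 0
  else
    let p := loopB n 0 1
    if p.2 = n then p.1
    else
      let forwards := n - PySem.Int.floordiv p.2 2
      let backwards := p.2 - n
      p.1 + (if forwards ≤ backwards then forwards - 1 else backwards)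

-- ===== PRECONDITION & SPEC =====
def Spec_solution (n : Int) (out : Int) : Prop := out = solution_alt n
instance (n : Int) (out : Int) : Decidable (Spec_solution n out) := by unfold Spec_solution; infer_instance

-- ===== CLAIM (what is proved, stated in full; the proofs are below) =====
def Claim_equal_solution : Prop := ∀ (n : Int), Dom_solution n → Spec_solution n (solution n)

-- ===== LEMMAS AND PROOFS =====

-- counting the true prefix of a monotone threshold predicate
theorem countWhileA_range (m : Int) : ∀ (j acc c : Int), j ≤ c →
    countWhileA m j acc (fun x => decide (x < c))
      = acc + min (c - j) (max (m - j) 0) := by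
  have H : ∀ (k : Nat) (j acc c : Int), (m - j).toNat = k → j ≤ c →
      countWhileA m j acc (fun x => decide (x < c))
        = acc + min (c - j) (max (m - j) 0) := by
    intro k
    induction k with
    | zero =>
      intro j acc c hk hjc
      rw [countWhileA, dif_neg (by omega : ¬ j < m)]
      omega
    | succ k ih =>
      intro j acc c hk hjc
      rw [countWhileA, dif_pos (by omega : j < m)]
      by_cases hlt : j < c
      · simp only [hlt, decide_true, if_true]
        rw [ih (j + 1) (acc + 1) c (by omega) (by omega)]
        omega
      · simp only [hlt, decide_false, Bool.false_eq_true, if_false]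
        omega
  intro j acc c hjc
  exact H (m - j).toNat j acc c rfl hjc

-- predicate rewriting for countWhileA
theorem countWhileA_congr (m : Int) : ∀ (j acc : Int) (p q : Int → Bool), (∀ x, p x = q x) →
    countWhileA m j acc p = countWhileA m j acc q := by
  have H : ∀ (k : Nat) (j acc : Int) (p q : Int → Bool), (m - j).toNat = k → (∀ x, p x = q x) →
      countWhileA m j acc p = countWhileA m j acc q := by
    intro k
    induction k with
    | zero =>
      intro j acc p q hk h
      have hjm : ¬ j < m := by omega
      conv_lhs => rw [countWhileA]
      conv_rhs => rw [countWhileA]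
      rw [dif_neg hjm, dif_neg hjm]
    | succ k ih =>
      intro j acc p q hk h
      have hjm : j < m := by omega
      conv_lhs => rw [countWhileA]
      conv_rhs => rw [countWhileA]
      rw [dif_pos hjm, dif_pos hjm, h j]
      split <;> [exact ih (j + 1) (acc + 1) p q (by omega) h; rfl]
  intro j acc p q h
  exact H (m - j).toNat j acc p q rfl h

-- loopB accumulates k additively
theorem loopB_shift (n : Int) : ∀ (t k : Int),
    loopB n k t = (k + (loopB n 0 t).1, (loopB n 0 t).2) := by
  have H : ∀ (m : Nat) (t : Int), (n - t).toNat ≤ m → ∀ k : Int,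
      loopB n k t = (k + (loopB n 0 t).1, (loopB n 0 t).2) := by
    intro m
    induction m with
    | zero =>
      intro t hm k
      have hg : ¬ (t < n ∧ 0 < t) := by omega
      have h0 : loopB n 0 t = (0, t) := by rw [loopB, dif_neg hg]
      rw [loopB, dif_neg hg, h0]
      simp
    | succ m ih =>
      intro t hm k
      by_cases hg : t < n ∧ 0 < t
      · have hmeas : (n - t * 2).toNat ≤ m := by omega
        have h0 : loopB n 0 t = (1 + (loopB n 0 (t * 2)).1, (loopB n 0 (t * 2)).2) := by
          rw [loopB, dif_pos hg, ih (t * 2) hmeas (0 + 1)]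
          norm_num
        rw [loopB, dif_pos hg, ih (t * 2) hmeas (k + 1), h0]
        simp [Prod.ext_iff]
        ring
      · have h0 : loopB n 0 t = (0, t) := by rw [loopB, dif_neg hg]
        rw [loopB, dif_neg hg, h0]
        simp
  intro t k
  exact H (n - t).toNat t le_rfl k

-- the main invariant: loopA from state (previous, 2*previous) equals steps + B's tail
theorem main_inv (n : Int) (hn : 2 < n) : ∀ (fuel : Nat) (previous steps : Int),
    1 ≤ previous → previous < n → n ≤ previous * 2 ^ fuel →
    loopA n fuel previous (previous * 2) steps =
      steps +
        (if (loopB n 0 (previous * 2)).2 = n then (loopB n 0 (previous * 2)).1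
         else (loopB n 0 (previous * 2)).1 +
           (if n - PySem.Int.floordiv (loopB n 0 (previous * 2)).2 2 ≤ (loopB n 0 (previous * 2)).2 - n
            then n - PySem.Int.floordiv (loopB n 0 (previous * 2)).2 2 - 1
            else (loopB n 0 (previous * 2)).2 - n)) := by
  intro fuel
  induction fuel with
  | zero =>
    intro previous steps h1 h2 h3
    simp at h3; omega
  | succ fuel' ih =>
    intro previous steps h1 h2 h3
    rw [loopA]
    by_cases he : previous * 2 = n
    · -- total = n : A returns steps; loopB stops at once with t = n
      have hg : ¬ (previous * 2 < n ∧ 0 < previous * 2) := by omega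
      have hstop : loopB n 0 (previous * 2) = (0, previous * 2) := by rw [loopB, dif_neg hg]
      rw [hstop]
      simp [he]
    · simp only [he, if_false]
      by_cases hgt : previous * 2 > n
      · -- total > n : both stop here; inner scans are the closed forms
        simp only [hgt, if_true, gt_iff_lt]
        have hg : ¬ (previous * 2 < n ∧ 0 < previous * 2) := by omega
        have hstop : loopB n 0 (previous * 2) = (0, previous * 2) := by rw [loopB, dif_neg hg]
        rw [hstop]
        have hb : countWhileA (previous * 2 * 2) 0 0
            (fun j => decide (previous * 2 - j > n)) = previous * 2 - n := by
          rw [countWhileA_congr _ _ _ _ (fun j => decide (j < previous * 2 - n))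
              (by intro x; simp only [decide_eq_decide]; omega),
            countWhileA_range _ 0 0 _ (by omega)]
          omega
        have hf : countWhileA (previous * 2 * 2) 0 0
            (fun k => decide (previous + k < n)) = n - previous := by
          rw [countWhileA_congr _ _ _ _ (fun k => decide (k < n - previous))
              (by intro x; simp only [decide_eq_decide]; omega),
            countWhileA_range _ 0 0 _ (by omega)]
          omega
        rw [hb, hf]
        have hfd : PySem.Int.floordiv (previous * 2) 2 = previous := by
          simp [PySem.Int.floordiv]
        simp only [hfd, if_neg he]
        split_ifs <;> omega
      · -- total < n : one more doubling on both sides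
        simp only [hgt, if_false]
        have hg : previous * 2 < n ∧ 0 < previous * 2 := by omega
        have hfuel : n ≤ previous * 2 * 2 ^ fuel' := by
          have e : previous * 2 ^ (fuel' + 1) = previous * 2 * 2 ^ fuel' := by
            rw [pow_succ]; ring
          linarith [h3, e.ge, e.le]
        have hrec := ih (previous * 2) (steps + 1) (by omega) (by omega) hfuel
        rw [hrec]
        have hstep : loopB n 0 (previous * 2) =
            (1 + (loopB n 0 (previous * 2 * 2)).1, (loopB n 0 (previous * 2 * 2)).2) := by
          rw [loopB, dif_pos hg, loopB_shift n (previous * 2 * 2) (0 + 1)]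
          simp
        rw [hstep]
        simp only
        split_ifs <;> omega

-- ===== VERDICT (by name: the statement is the Claim_ definition above) =====
theorem solution_spec : Claim_equal_solution := by
  unfold Claim_equal_solution
  intro n _
  unfold Spec_solution solution solution_alt
  by_cases h : n ≤ 2
  · simp [h]
  · simp only [h, if_false]
    have hm : n.toNat = (n - 1).toNat + 1 := by omega
    rw [hm, loopA]
    simp only [if_neg (by omega : ¬ (1 : Int) = n), if_neg (by omega : ¬ (1 : Int) > n)]
    have hfuel : n ≤ 1 * 2 ^ (n - 1).toNat := by
      rw [one_mul]
      have h1 : ((n - 1).toNat : Int) < (2 : Int) ^ (n - 1).toNat := by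
        exact_mod_cast Nat.lt_two_pow_self
      have hc : ((n - 1).toNat : Int) = n - 1 := by omega
      linarith [h1, hc.ge, hc.le]
    have happ := main_inv n (by omega) (n - 1).toNat 1 1 (by omega) (by omega) hfuel
    simp only [zero_add]
    rw [happ]
    have hg1 : (1 : Int) < n ∧ (0 : Int) < 1 := by omega
    have hL : loopB n 0 1 = (1 + (loopB n 0 (1 * 2)).1, (loopB n 0 (1 * 2)).2) := by
      rw [loopB, dif_pos hg1, loopB_shift n (1 * 2) (0 + 1)]
      simp
    rw [hL]
    simp only
    split_ifs <;> omega
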